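-- pv_equiv track=rewrite | github.com/richscottwill/agent-bridge | dashboards/generate-command-center.py | enrich_intel_with_status
-- ===== SOURCE A (Python) =====
-- def enrich_intel_with_status(items, key_field="text"):
--     """Add status field to intel items based on heuristics.
--
--     Status values: not_started, in_progress, done
--     Heuristics:
--     - If item has 'done' or 'completed' in context → done
--     - If item has days_old > 0 and overdue → not_started (stale)
--     - Default → not_started
--
--     Also enriches done items with completion context:
--     - completed_via: how the promise was fulfilled (Slack DM, email, doc shared, etc.)
--     - completed_message: what was communicated when closing the loop
--
--     Future: pull status from Asana custom field or manual tag.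
--     """
--     for item in items:
--         if not item.get("status"):
--             ctx = (item.get("context") or "").lower()
--             if "done" in ctx or "completed" in ctx or "shipped" in ctx or "sent" in ctx:
--                 item["status"] = "done"
--             elif "in progress" in ctx or "in development" in ctx or "drafted" in ctx or "started" in ctx:
--                 item["status"] = "in_progress"
--             else:
--                 item["status"] = "not_started"
--
--         # Enrich done items with completion context if not already set
--         if item.get("status") == "done" and not item.get("completed_via"):
--             ctx = (item.get("context") or "").lower()
--             if "slack" in ctx or "dm" in ctx:
--                 item["completed_via"] = "Slack message"
--             elif "email" in ctx:
--                 item["completed_via"] = "Email"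
--             elif "doc" in ctx or "quip" in ctx or "wiki" in ctx:
--                 item["completed_via"] = "Document shared"
--             elif "asana" in ctx or "task" in ctx:
--                 item["completed_via"] = "Asana task update"
--             elif "meeting" in ctx or "call" in ctx:
--                 item["completed_via"] = "Discussed in meeting"
--             else:
--                 item["completed_via"] = "Completed (channel unknown)"
--     return items
-- ===== SOURCE B (Python) =====
-- # Text-major keyword scan: instead of chained `kw in ctx` tests, slide over the
-- # context once (naive multi-pattern matching), record every keyword hit with a
-- # priority, and keep the minimum-priority hit; the field is the best hit's value
-- # (or the default when nothing matched).
--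
-- STATUS_TABLE = [
--     ("done", 0, "done"), ("completed", 0, "done"),
--     ("shipped", 0, "done"), ("sent", 0, "done"),
--     ("in progress", 1, "in_progress"), ("in development", 1, "in_progress"),
--     ("drafted", 1, "in_progress"), ("started", 1, "in_progress"),
-- ]
-- CHANNEL_TABLE = [
--     ("slack", 0, "Slack message"), ("dm", 0, "Slack message"),
--     ("email", 1, "Email"),
--     ("doc", 2, "Document shared"), ("quip", 2, "Document shared"), ("wiki", 2, "Document shared"),
--     ("asana", 3, "Asana task update"), ("task", 3, "Asana task update"),
--     ("meeting", 4, "Discussed in meeting"), ("call", 4, "Discussed in meeting"),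
-- ]
--
--
-- def _scan_best(ctx, table):
--     """One left-to-right sweep of ctx; at each position try every keyword and
--     keep the hit with the smallest priority. Returns (priority, value) or None."""
--     best = None
--     for i in range(len(ctx)):
--         for kw, pri, val in table:
--             if ctx.startswith(kw, i) and (best is None or pri < best[0]):
--                 best = (pri, val)
--     return best
--
--
-- def enrich_intel_with_status(items, key_field="text"):
--     for item in items:
--         if not item.get("status"):
--             ctx = (item.get("context") or "").lower()
--             hit = _scan_best(ctx, STATUS_TABLE)
--             item["status"] = hit[1] if hit else "not_started"
--         if item.get("status") == "done" and not item.get("completed_via"):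
--             ctx = (item.get("context") or "").lower()
--             hit = _scan_best(ctx, CHANNEL_TABLE)
--             item["completed_via"] = hit[1] if hit else "Completed (channel unknown)"
--     return items
-- ===== Notes on version B (the rewrite author's own statement) =====
-- stated objective: alternative
-- what changed: A tests each keyword with chained `kw in ctx` first-match if/elif cascades; B instead makes one text-major sweep over the context (naive multi-pattern matching position by position), records every keyword hit with a priority, keeps the minimum-priority hit and maps it to the field value, with the default when nothing matched.
import Mathlib
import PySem

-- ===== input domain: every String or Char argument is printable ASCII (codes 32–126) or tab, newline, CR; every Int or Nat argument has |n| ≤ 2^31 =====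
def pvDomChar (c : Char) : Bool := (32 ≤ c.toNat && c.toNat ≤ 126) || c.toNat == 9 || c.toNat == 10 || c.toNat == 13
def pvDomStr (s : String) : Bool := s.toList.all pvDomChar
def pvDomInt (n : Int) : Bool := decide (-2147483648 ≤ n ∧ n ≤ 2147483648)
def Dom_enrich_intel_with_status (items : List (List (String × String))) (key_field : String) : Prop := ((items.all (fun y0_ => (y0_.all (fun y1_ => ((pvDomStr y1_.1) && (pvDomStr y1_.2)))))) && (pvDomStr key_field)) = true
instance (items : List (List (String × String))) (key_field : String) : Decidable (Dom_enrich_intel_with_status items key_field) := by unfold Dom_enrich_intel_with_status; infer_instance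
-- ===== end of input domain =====

-- B replaces A's chained `keyword in ctx` tests by a single text-major sweep: it scans the
-- context position by position (naive multi-pattern matching), records every keyword hit with
-- a priority, keeps the minimum-priority hit and maps it to the field value (alternative
-- decomposition, similar cost). Both Pythons mutate the item dicts in place identically; the
-- equivalence proved here is about the returned value.

-- ===== PORT A =====
-- 'not item.get(k)': true iff the key is present with a non-empty string value
def pvA_truthy (o : Option String) : Bool :=
  match o with
  | none => false
  | some s => s != ""

def pvA_item (item : List (String × String)) : List (String × String) :=
  let d0 := PySem.Dict.mk item
  let d1 :=
    if !(pvA_truthy (d0.get? "status")) then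
      let ctx := PySem.Str.lower ((d0.get? "context").getD "")
      if PySem.Str.isIn "done" ctx || PySem.Str.isIn "completed" ctx ||
         PySem.Str.isIn "shipped" ctx || PySem.Str.isIn "sent" ctx then
        d0.insert "status" "done"
      else if PySem.Str.isIn "in progress" ctx || PySem.Str.isIn "in development" ctx ||
              PySem.Str.isIn "drafted" ctx || PySem.Str.isIn "started" ctx then
        d0.insert "status" "in_progress"
      else
        d0.insert "status" "not_started"
    else d0
  let d2 :=
    if d1.get? "status" == some "done" && !(pvA_truthy (d1.get? "completed_via")) then
      let ctx := PySem.Str.lower ((d1.get? "context").getD "")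
      if PySem.Str.isIn "slack" ctx || PySem.Str.isIn "dm" ctx then
        d1.insert "completed_via" "Slack message"
      else if PySem.Str.isIn "email" ctx then
        d1.insert "completed_via" "Email"
      else if PySem.Str.isIn "doc" ctx || PySem.Str.isIn "quip" ctx ||
              PySem.Str.isIn "wiki" ctx then
        d1.insert "completed_via" "Document shared"
      else if PySem.Str.isIn "asana" ctx || PySem.Str.isIn "task" ctx then
        d1.insert "completed_via" "Asana task update"
      else if PySem.Str.isIn "meeting" ctx || PySem.Str.isIn "call" ctx then
        d1.insert "completed_via" "Discussed in meeting"
      else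
        d1.insert "completed_via" "Completed (channel unknown)"
    else d1
  d2.items

def enrich_intel_with_status (items : List (List (String × String))) (key_field : String) : List (List (String × String)) :=
  items.map pvA_item

-- ===== PORT B =====
def pvB_statusTable : List (String × Nat × String) :=
  [ ("done", 0, "done"), ("completed", 0, "done"),
    ("shipped", 0, "done"), ("sent", 0, "done"),
    ("in progress", 1, "in_progress"), ("in development", 1, "in_progress"),
    ("drafted", 1, "in_progress"), ("started", 1, "in_progress") ]

def pvB_channelTable : List (String × Nat × String) :=
  [ ("slack", 0, "Slack message"), ("dm", 0, "Slack message"),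
    ("email", 1, "Email"),
    ("doc", 2, "Document shared"), ("quip", 2, "Document shared"), ("wiki", 2, "Document shared"),
    ("asana", 3, "Asana task update"), ("task", 3, "Asana task update"),
    ("meeting", 4, "Discussed in meeting"), ("call", 4, "Discussed in meeting") ]

-- ctx.startswith(kw, i)  =  kw is a prefix of ctx from position i (exact: Chars.startswith on the dropped suffix)
def pvB_hitAt (s : List Char) (kw : String) (i : Nat) : Bool :=
  PySem.Chars.startswith (s.drop i) kw.toList

-- one left-to-right sweep of ctx; at each position try every keyword, keep the min-priority hit
def pvB_scanBest (ctx : String) (table : List (String × Nat × String)) : Option (Nat × String) :=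
  (List.range ctx.toList.length).foldl
    (fun best i =>
      table.foldl
        (fun best e =>
          if pvB_hitAt ctx.toList e.1 i &&
             (match best with | none => true | some q => decide (e.2.1 < q.1)) then
            some (e.2.1, e.2.2)
          else best)
        best)
    none

def pvB_truthy (o : Option String) : Bool :=
  match o with
  | none => false
  | some s => s != ""

def pvB_item (item : List (String × String)) : List (String × String) :=
  let d0 := PySem.Dict.mk item
  let d1 :=
    if !(pvB_truthy (d0.get? "status")) then
      let ctx := PySem.Str.lower ((d0.get? "context").getD "")
      let hit := pvB_scanBest ctx pvB_statusTable
      d0.insert "status" (match hit with | some q => q.2 | none => "not_started")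
    else d0
  let d2 :=
    if d1.get? "status" == some "done" && !(pvB_truthy (d1.get? "completed_via")) then
      let ctx := PySem.Str.lower ((d1.get? "context").getD "")
      let hit := pvB_scanBest ctx pvB_channelTable
      d1.insert "completed_via" (match hit with | some q => q.2 | none => "Completed (channel unknown)")
    else d1
  d2.items

def enrich_intel_with_status_alt (items : List (List (String × String))) (key_field : String) : List (List (String × String)) :=
  items.map pvB_item

-- ===== PRECONDITION & SPEC =====
def Spec_enrich_intel_with_status (items : List (List (String × String))) (key_field : String) (out : List (List (String × String))) : Prop := out = enrich_intel_with_status_alt items key_field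
instance (items : List (List (String × String))) (key_field : String) (out : List (List (String × String))) : Decidable (Spec_enrich_intel_with_status items key_field out) := by unfold Spec_enrich_intel_with_status; infer_instance

-- ===== CLAIM (what is proved, stated in full; the proofs are below) =====
def Claim_equal_enrich_intel_with_status : Prop := ∀ (items : List (List (String × String))) (key_field : String), Dom_enrich_intel_with_status items key_field → Spec_enrich_intel_with_status items key_field (enrich_intel_with_status items key_field)

-- ===== LEMMAS AND PROOFS =====


def pvMerge (b c : Option (Nat × String)) : Option (Nat × String) :=
  match b, c with
  | none, c => c
  | some q, none => some q
  | some q, some r => if r.1 < q.1 then some r else some q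

theorem pvMerge_none_right (b : Option (Nat × String)) : pvMerge b none = b := by
  cases b <;> rfl

theorem pvMerge_assoc (a b c : Option (Nat × String)) :
    pvMerge (pvMerge a b) c = pvMerge a (pvMerge b c) := by
  cases a <;> cases b <;> cases c <;>
    simp only [pvMerge] <;> split_ifs <;> simp only [pvMerge] <;> split_ifs <;>
    first | rfl | omega | (exfalso; omega)

def pvUpd (s : List Char) (i : Nat) (best : Option (Nat × String)) (e : String × Nat × String) : Option (Nat × String) :=
  if pvB_hitAt s e.1 i &&
     (match best with | none => true | some q => decide (e.2.1 < q.1)) then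
    some (e.2.1, e.2.2)
  else best

theorem pvUpd_eq_merge (s : List Char) (i : Nat) (e : String × Nat × String) (b : Option (Nat × String)) :
    pvUpd s i b e = pvMerge b (if pvB_hitAt s e.1 i then some (e.2.1, e.2.2) else none) := by
  cases b <;> cases h : pvB_hitAt s e.1 i <;>
    simp only [pvUpd, pvMerge, h, Bool.true_and, Bool.false_and, if_true, if_false,
      decide_eq_true_eq, Bool.false_eq_true, ite_false, ite_true] <;>
    (try rfl) <;> split_ifs <;> simp_all

theorem foldl_merge_init {α : Type} (f : Option (Nat × String) → α → Option (Nat × String))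
    (g : α → Option (Nat × String)) (h : ∀ b a, f b a = pvMerge b (g a)) :
    ∀ (l : List α) (b : Option (Nat × String)), l.foldl f b = pvMerge b (l.foldl f none) := by
  intro l
  induction l with
  | nil => intro b; simp [pvMerge_none_right]
  | cons a t ih =>
      intro b
      simp only [List.foldl_cons]
      rw [ih (f b a), ih (f none a), h b a, h none a]
      rw [pvMerge_assoc]
      rfl

def pvStep (s : List Char) (table : List (String × Nat × String)) (b : Option (Nat × String)) (i : Nat) : Option (Nat × String) :=
  table.foldl (pvUpd s i) b

theorem pvStep_eq_merge (s : List Char) (table : List (String × Nat × String)) (b : Option (Nat × String)) (i : Nat) :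
    pvStep s table b i = pvMerge b (pvStep s table none i) := by
  exact foldl_merge_init _ (fun e => if pvB_hitAt s e.1 i then some (e.2.1, e.2.2) else none)
    (fun b e => pvUpd_eq_merge s i e b) table b

theorem pvMerge_none_left (x : Option (Nat × String)) : pvMerge none x = x := rfl

-- every value the per-position fold can return comes from a table entry
theorem pvTabBest_mem (s : List Char) (i : Nat) :
    ∀ (t : List (String × Nat × String)) (q : Nat × String),
      pvStep s t none i = some q → ∃ e ∈ t, q = (e.2.1, e.2.2) := by
  intro t
  induction t with
  | nil => intro q h; exact absurd h (by simp [pvStep])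
  | cons e t ih =>
      intro q h
      have h2 : pvStep s (e :: t) none i = pvMerge (pvUpd s i none e) (pvStep s t none i) := by
        show pvStep s t (pvUpd s i none e) i = _
        exact pvStep_eq_merge s t _ i
      rw [h2, pvUpd_eq_merge, pvMerge_none_left] at h
      rcases h3 : pvStep s t none i with _ | q' <;> rw [h3] at h
      · rw [pvMerge_none_right] at h
        by_cases hh : pvB_hitAt s e.1 i = true
        · rw [if_pos hh] at h
          exact ⟨e, by simp, (Option.some.inj h).symm⟩
        · rw [if_neg hh] at h; exact absurd h (by simp)
      · by_cases hh : pvB_hitAt s e.1 i = true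
        · rw [if_pos hh] at h
          simp only [pvMerge] at h
          split_ifs at h with hc
          · obtain ⟨f, hf, hq⟩ := ih q' h3
            exact ⟨f, by simp [hf], by rw [← Option.some.inj h]; exact hq⟩
          · exact ⟨e, by simp, (Option.some.inj h).symm⟩
        · rw [if_neg hh, pvMerge_none_left] at h
          obtain ⟨f, hf, hq⟩ := ih q' h3
          exact ⟨f, by simp [hf], by rw [← Option.some.inj h]; exact hq⟩

-- the per-position best is the FIRST hit of the table when priorities are non-decreasing
theorem pvStep_firstHit (s : List Char) (i : Nat) :
    ∀ (t : List (String × Nat × String)),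
      t.Pairwise (fun e f => e.2.1 ≤ f.2.1) →
      pvStep s t none i = (t.find? (fun e => pvB_hitAt s e.1 i)).map (fun e => (e.2.1, e.2.2)) := by
  intro t
  induction t with
  | nil => intro _; rfl
  | cons e t ih =>
      intro hp
      have h2 : pvStep s (e :: t) none i = pvMerge (pvUpd s i none e) (pvStep s t none i) := by
        show pvStep s t (pvUpd s i none e) i = _
        exact pvStep_eq_merge s t _ i
      rw [h2, pvUpd_eq_merge, pvMerge_none_left]
      rw [List.pairwise_cons] at hp
      by_cases hh : pvB_hitAt s e.1 i = true
      · rw [if_pos hh]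
        have hfind : List.find? (fun f => pvB_hitAt s f.1 i) (e :: t) = some e :=
          List.find?_cons_of_pos hh
        rw [hfind, Option.map_some]
        rcases h3 : pvStep s t none i with _ | q'
        · rfl
        · obtain ⟨f, hf, hq⟩ := pvTabBest_mem s i t q' h3
          have hle : ¬ q'.1 < e.2.1 := by
            have := hp.1 f hf
            rw [hq]
            simpa using this
          simp only [pvMerge]
          rw [if_neg hle]
      · have hfind : List.find? (fun f => pvB_hitAt s f.1 i) (e :: t) =
            List.find? (fun f => pvB_hitAt s f.1 i) t :=
          List.find?_cons_of_neg (by simpa using hh)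
        rw [if_neg hh, pvMerge_none_left, hfind]
        exact ih hp.2

-- evaluate find? on the literal table, prioritised-group form
theorem group2 (b1 b2 b3 b4 c1 c2 c3 c4 : Bool) (X Y : Nat × String) :
    (if b1 then some X else if b2 then some X else if b3 then some X else if b4 then some X
     else if c1 then some Y else if c2 then some Y else if c3 then some Y else if c4 then some Y
     else none)
      = (if b1 || b2 || b3 || b4 then some X
         else if c1 || c2 || c3 || c4 then some Y else none) := by
  split_ifs <;> simp_all

theorem bestAt_status (s : List Char) (i : Nat) :
    pvStep s pvB_statusTable none i =
      (if pvB_hitAt s "done" i || pvB_hitAt s "completed" i || pvB_hitAt s "shipped" i || pvB_hitAt s "sent" i then some ((0:Nat), "done")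
       else if pvB_hitAt s "in progress" i || pvB_hitAt s "in development" i || pvB_hitAt s "drafted" i || pvB_hitAt s "started" i then some (1, "in_progress")
       else none) := by
  rw [pvStep_firstHit s i _ (by decide), ← group2]
  simp only [pvB_statusTable]
  split_ifs <;>
    simp_all [List.find?_cons_of_pos, List.find?_cons_of_neg]

theorem merge_grouped2 (a0 a1 g0 g1 : Bool) (X Y : Nat × String) (h : X.1 < Y.1) :
    pvMerge (if a0 then some X else if a1 then some Y else none)
            (if g0 then some X else if g1 then some Y else none)
      = (if a0 || g0 then some X else if a1 || g1 then some Y else none) := by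
  cases a0 <;> cases a1 <;> cases g0 <;> cases g1 <;>
    simp_all [pvMerge] <;> omega

theorem fold_status (s : List Char) : ∀ n : Nat,
    (List.range n).foldl (pvStep s pvB_statusTable) none =
      (if (List.range n).any (fun i => pvB_hitAt s "done" i || pvB_hitAt s "completed" i || pvB_hitAt s "shipped" i || pvB_hitAt s "sent" i) then some ((0:Nat), "done")
       else if (List.range n).any (fun i => pvB_hitAt s "in progress" i || pvB_hitAt s "in development" i || pvB_hitAt s "drafted" i || pvB_hitAt s "started" i) then some (1, "in_progress")
       else none) := by
  intro n
  induction n with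
  | zero => rfl
  | succ n ih =>
      rw [List.range_succ, List.foldl_append, List.foldl_cons, List.foldl_nil, ih,
        pvStep_eq_merge, bestAt_status, merge_grouped2 _ _ _ _ _ _ (by norm_num)]
      simp only [List.any_append, List.any_cons, List.any_nil, Bool.or_false]

theorem group5 (b1 b2 c1 d1 d2 d3 e1 e2 f1 f2 : Bool) (V W X Y Z : Nat × String) :
    (if b1 then some V else if b2 then some V else if c1 then some W
     else if d1 then some X else if d2 then some X else if d3 then some X
     else if e1 then some Y else if e2 then some Y
     else if f1 then some Z else if f2 then some Z else none)
      = (if b1 || b2 then some V else if c1 then some W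
         else if d1 || d2 || d3 then some X else if e1 || e2 then some Y
         else if f1 || f2 then some Z else none) := by
  split_ifs <;> simp_all

theorem bestAt_channel (s : List Char) (i : Nat) :
    pvStep s pvB_channelTable none i =
      (if pvB_hitAt s "slack" i || pvB_hitAt s "dm" i then some ((0:Nat), "Slack message")
       else if pvB_hitAt s "email" i then some (1, "Email")
       else if pvB_hitAt s "doc" i || pvB_hitAt s "quip" i || pvB_hitAt s "wiki" i then some (2, "Document shared")
       else if pvB_hitAt s "asana" i || pvB_hitAt s "task" i then some (3, "Asana task update")
       else if pvB_hitAt s "meeting" i || pvB_hitAt s "call" i then some (4, "Discussed in meeting")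
       else none) := by
  rw [pvStep_firstHit s i _ (by decide), ← group5]
  simp only [pvB_channelTable]
  split_ifs <;>
    simp_all [List.find?_cons_of_pos, List.find?_cons_of_neg]

set_option maxHeartbeats 2000000 in
theorem merge_grouped5 (a0 a1 a2 a3 a4 g0 g1 g2 g3 g4 : Bool) (V W X Y Z : Nat × String)
    (h01 : V.1 < W.1) (h12 : W.1 < X.1) (h23 : X.1 < Y.1) (h34 : Y.1 < Z.1) :
    pvMerge (if a0 then some V else if a1 then some W else if a2 then some X else if a3 then some Y else if a4 then some Z else none)
            (if g0 then some V else if g1 then some W else if g2 then some X else if g3 then some Y else if g4 then some Z else none)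
      = (if a0 || g0 then some V else if a1 || g1 then some W else if a2 || g2 then some X
         else if a3 || g3 then some Y else if a4 || g4 then some Z else none) := by
  have h02 : V.1 < X.1 := by omega
  have h03 : V.1 < Y.1 := by omega
  have h04 : V.1 < Z.1 := by omega
  have h13 : W.1 < Y.1 := by omega
  have h14 : W.1 < Z.1 := by omega
  have h24 : X.1 < Z.1 := by omega
  cases a0 <;> cases g0 <;> cases a1 <;> cases g1 <;> cases a2 <;> cases g2 <;>
    cases a3 <;> cases g3 <;> cases a4 <;> cases g4 <;>
    simp_all [pvMerge] <;> first | rfl | omega | (intro hlt; exact absurd hlt (by omega))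

theorem fold_channel (s : List Char) : ∀ n : Nat,
    (List.range n).foldl (pvStep s pvB_channelTable) none =
      (if (List.range n).any (fun i => pvB_hitAt s "slack" i || pvB_hitAt s "dm" i) then some ((0:Nat), "Slack message")
       else if (List.range n).any (fun i => pvB_hitAt s "email" i) then some (1, "Email")
       else if (List.range n).any (fun i => pvB_hitAt s "doc" i || pvB_hitAt s "quip" i || pvB_hitAt s "wiki" i) then some (2, "Document shared")
       else if (List.range n).any (fun i => pvB_hitAt s "asana" i || pvB_hitAt s "task" i) then some (3, "Asana task update")
       else if (List.range n).any (fun i => pvB_hitAt s "meeting" i || pvB_hitAt s "call" i) then some (4, "Discussed in meeting")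
       else none) := by
  intro n
  induction n with
  | zero => rfl
  | succ n ih =>
      rw [List.range_succ, List.foldl_append, List.foldl_cons, List.foldl_nil, ih,
        pvStep_eq_merge, bestAt_channel,
        merge_grouped5 _ _ _ _ _ _ _ _ _ _ _ _ _ _ _ (by norm_num) (by norm_num) (by norm_num) (by norm_num)]
      simp only [List.any_append, List.any_cons, List.any_nil, Bool.or_false]

theorem any_orB {α : Type} (l : List α) (f g : α → Bool) :
    l.any (fun x => f x || g x) = (l.any f || l.any g) := by
  induction l with
  | nil => rfl
  | cons a t ih => simp [List.any_cons, ih, Bool.or_assoc, Bool.or_left_comm]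

theorem any_hit (s : List Char) (kw : String) (h : kw.toList ≠ []) :
    (List.range s.length).any (fun i => pvB_hitAt s kw i) = PySem.Chars.isIn kw.toList s := by
  cases hb : PySem.Chars.isIn kw.toList s with
  | true =>
      obtain ⟨j, hj⟩ := (PySem.Chars.exists_prefix_drop_iff_isIn (sub := kw.toList) (s := s)).mpr hb
      have hjlt : j < s.length := by
        by_contra hge
        have hnil : s.drop j = [] := List.drop_eq_nil_of_le (by omega)
        rw [hnil] at hj
        exact h (List.prefix_nil.mp hj)
      simp only [List.any_eq_true, List.mem_range]
      exact ⟨j, hjlt, by simpa [pvB_hitAt, PySem.Chars.startswith_iff] using hj⟩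
  | false =>
      rw [Bool.eq_false_iff]
      intro hany
      simp only [List.any_eq_true, List.mem_range] at hany
      obtain ⟨i, _, hi⟩ := hany
      have : PySem.Chars.isIn kw.toList s = true :=
        (PySem.Chars.exists_prefix_drop_iff_isIn (sub := kw.toList) (s := s)).mp
          ⟨i, by simpa [pvB_hitAt, PySem.Chars.startswith_iff] using hi⟩
      rw [hb] at this
      cases this

theorem scanBest_status (ctx : String) :
    pvB_scanBest ctx pvB_statusTable =
      (if PySem.Str.isIn "done" ctx || PySem.Str.isIn "completed" ctx ||
          PySem.Str.isIn "shipped" ctx || PySem.Str.isIn "sent" ctx then some (0, "done")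
       else if PySem.Str.isIn "in progress" ctx || PySem.Str.isIn "in development" ctx ||
               PySem.Str.isIn "drafted" ctx || PySem.Str.isIn "started" ctx then some (1, "in_progress")
       else none) := by
  have h0 : pvB_scanBest ctx pvB_statusTable =
      (List.range ctx.toList.length).foldl (pvStep ctx.toList pvB_statusTable) none := rfl
  rw [h0, fold_status]
  simp only [any_orB]
  rw [any_hit _ "done" (by decide), any_hit _ "completed" (by decide),
    any_hit _ "shipped" (by decide), any_hit _ "sent" (by decide),
    any_hit _ "in progress" (by decide), any_hit _ "in development" (by decide),
    any_hit _ "drafted" (by decide), any_hit _ "started" (by decide)]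
  simp [PySem.Str.isIn_eq, Bool.or_assoc]

theorem scanBest_channel (ctx : String) :
    pvB_scanBest ctx pvB_channelTable =
      (if PySem.Str.isIn "slack" ctx || PySem.Str.isIn "dm" ctx then some (0, "Slack message")
       else if PySem.Str.isIn "email" ctx then some (1, "Email")
       else if PySem.Str.isIn "doc" ctx || PySem.Str.isIn "quip" ctx ||
               PySem.Str.isIn "wiki" ctx then some (2, "Document shared")
       else if PySem.Str.isIn "asana" ctx || PySem.Str.isIn "task" ctx then some (3, "Asana task update")
       else if PySem.Str.isIn "meeting" ctx || PySem.Str.isIn "call" ctx then some (4, "Discussed in meeting")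
       else none) := by
  have h0 : pvB_scanBest ctx pvB_channelTable =
      (List.range ctx.toList.length).foldl (pvStep ctx.toList pvB_channelTable) none := rfl
  rw [h0, fold_channel]
  simp only [any_orB]
  rw [any_hit _ "slack" (by decide), any_hit _ "dm" (by decide),
    any_hit _ "email" (by decide),
    any_hit _ "doc" (by decide), any_hit _ "quip" (by decide), any_hit _ "wiki" (by decide),
    any_hit _ "asana" (by decide), any_hit _ "task" (by decide),
    any_hit _ "meeting" (by decide), any_hit _ "call" (by decide)]
  simp [PySem.Str.isIn_eq, Bool.or_assoc]

theorem ite2_insert {κ ν : Type} [BEq κ] (d : PySem.Dict κ ν) (k : κ) (c1 c2 : Bool) (a b c : ν) :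
    (if c1 then d.insert k a else if c2 then d.insert k b else d.insert k c)
      = d.insert k (if c1 then a else if c2 then b else c) := by
  cases c1 <;> cases c2 <;> rfl

theorem matchd_ite (c : Prop) [Decidable c] (x : Nat × String) (o : Option (Nat × String)) (d : String) :
    (match (if c then some x else o) with | some q => q.2 | none => d)
      = if c then x.2 else (match o with | some q => q.2 | none => d) := by
  split_ifs <;> rfl

theorem pv_item_eq (item : List (String × String)) : pvA_item item = pvB_item item := by
  unfold pvA_item pvB_item
  simp only [scanBest_status, scanBest_channel, matchd_ite, pvA_truthy, pvB_truthy,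
    ← apply_ite (fun v => (PySem.Dict.mk item).insert "status" v), ite2_insert]
  split_ifs <;> rfl

-- ===== VERDICT (by name: the statement is the Claim_ definition above) =====
theorem enrich_intel_with_status_spec : Claim_equal_enrich_intel_with_status := by
  intro items key_field _
  unfold Spec_enrich_intel_with_status enrich_intel_with_status enrich_intel_with_status_alt
  exact List.map_congr_left (fun x _ => pv_item_eq x)
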